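-- pv_equiv track=rewrite | github.com/SIGCOMM22-5GMobility/artifact | src/common/prefix_span.py | projectSequence
-- ===== SOURCE A (Python) =====
-- import copy
--
-- def projectSequence(sequence, prefix, newEvent):
--     result = None
--     for i, itemset in enumerate(sequence):
--         if result is None:
--             if (not newEvent) or i > 0:
--                 if all(x in itemset for x in prefix):
--                     result = [list(itemset)]
--         else:
--             result.append(copy.copy(itemset))
--     return result
-- ===== SOURCE B (Python) =====
-- import copy
--
-- def projectSequence(sequence, prefix, newEvent):
--     for i, itemset in enumerate(sequence):
--         if ((not newEvent) or i > 0) and all(x in itemset for x in prefix):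
--             return [list(itemset)] + [copy.copy(x) for x in sequence[i + 1:]]
--     return None
-- ===== Notes on version B (the rewrite author's own statement) =====
-- stated objective: simpler
-- what changed: Replaces the flag-carrying single pass (Option accumulator appended element by element) with a find-then-build decomposition: locate the first matching itemset, then return it consed onto the remaining suffix via a slice.
import Mathlib
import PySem

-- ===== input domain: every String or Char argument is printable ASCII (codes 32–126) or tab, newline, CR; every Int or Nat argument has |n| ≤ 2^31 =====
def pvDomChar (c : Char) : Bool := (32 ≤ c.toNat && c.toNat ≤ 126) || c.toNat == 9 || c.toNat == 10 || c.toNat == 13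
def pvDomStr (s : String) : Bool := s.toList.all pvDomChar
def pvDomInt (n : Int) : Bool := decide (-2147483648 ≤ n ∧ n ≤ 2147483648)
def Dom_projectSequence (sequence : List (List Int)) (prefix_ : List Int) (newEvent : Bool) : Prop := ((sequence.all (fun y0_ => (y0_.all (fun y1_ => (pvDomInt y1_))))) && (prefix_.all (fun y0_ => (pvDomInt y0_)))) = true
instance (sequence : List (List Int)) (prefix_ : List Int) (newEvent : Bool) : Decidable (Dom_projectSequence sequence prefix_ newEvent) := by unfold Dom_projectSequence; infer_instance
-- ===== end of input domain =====

-- B replaces A's flag-carrying single pass (Option accumulator appended to element by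
-- element) with a find-then-build decomposition: find the first matching itemset, then
-- return it consed onto the suffix slice. Objective: simpler.

-- ===== PORT A =====
-- one loop step: result is None → maybe start the result; otherwise append a copy
def aStep (prefix_ : List Int) (newEvent : Bool)
    (res : Option (List (List Int))) (p : Int × List Int) : Option (List (List Int)) :=
  match res with
  | none =>
      if ((!newEvent) || decide (p.1 > 0)) && prefix_.all (fun x => decide (x ∈ p.2)) then
        some [p.2]
      else none
  | some r => some (r ++ [p.2])

def projectSequence (sequence : List (List Int)) (prefix_ : List Int) (newEvent : Bool) :
    Option (List (List Int)) :=
  (PySem.List.enumerate sequence).foldl (aStep prefix_ newEvent) none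

-- ===== PORT B =====
-- Source B's for-loop with early return: on the first (i, itemset) that matches, return
-- [list(itemset)] + copies of sequence[i+1:]; fall through to None.
def altLoop (sequence : List (List Int)) (prefix_ : List Int) (newEvent : Bool) :
    List (Int × List Int) → Option (List (List Int))
  | [] => none
  | (i, itemset) :: rest =>
      if ((!newEvent) || decide (i > 0)) && prefix_.all (fun x => decide (x ∈ itemset)) then
        some (itemset :: PySem.List.slice sequence (some (i + 1)) none)
      else altLoop sequence prefix_ newEvent rest

def projectSequence_alt (sequence : List (List Int)) (prefix_ : List Int) (newEvent : Bool) :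
    Option (List (List Int)) :=
  altLoop sequence prefix_ newEvent (PySem.List.enumerate sequence)

-- ===== PRECONDITION & SPEC =====
def Spec_projectSequence (sequence : List (List Int)) (prefix_ : List Int) (newEvent : Bool) (out : Option (List (List Int))) : Prop := out = projectSequence_alt sequence prefix_ newEvent
instance (sequence : List (List Int)) (prefix_ : List Int) (newEvent : Bool) (out : Option (List (List Int))) : Decidable (Spec_projectSequence sequence prefix_ newEvent out) := by unfold Spec_projectSequence; infer_instance

-- ===== CLAIM (what is proved, stated in full; the proofs are below) =====
def Claim_equal_projectSequence : Prop := ∀ (sequence : List (List Int)) (prefix_ : List Int) (newEvent : Bool), Dom_projectSequence sequence prefix_ newEvent → Spec_projectSequence sequence prefix_ newEvent (projectSequence sequence prefix_ newEvent)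

-- ===== LEMMAS AND PROOFS =====

-- once A's result is started, the rest of the loop just appends the remaining itemsets
theorem foldl_aStep_some (prefix_ : List Int) (newEvent : Bool)
    (l : List (Int × List Int)) (r : List (List Int)) :
    l.foldl (aStep prefix_ newEvent) (some r) = some (r ++ l.map (·.2)) := by
  induction l generalizing r with
  | nil => simp
  | cons p t ih => simp [aStep, ih]

-- A's loop from offset s, as a structural recursion over the remaining itemsets
theorem foldl_aStep_none (prefix_ : List Int) (newEvent : Bool) :
    ∀ (xs : List (List Int)) (s : Nat),
    (PySem.List.enumerate xs (s : Int)).foldl (aStep prefix_ newEvent) none =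
      (match xs with
       | [] => none
       | it :: rest =>
          if ((!newEvent) || decide ((s : Int) > 0)) && prefix_.all (fun x => decide (x ∈ it)) then
            some (it :: rest)
          else (PySem.List.enumerate rest ((s : Int) + 1)).foldl (aStep prefix_ newEvent) none) := by
  intro xs s
  cases xs with
  | nil => simp [PySem.List.enumerate_nil]
  | cons it rest =>
      simp only [PySem.List.enumerate_cons, List.foldl_cons]
      by_cases h : (((!newEvent) || decide ((s : Int) > 0)) && prefix_.all (fun x => decide (x ∈ it))) = true
      · rw [if_pos h]
        show List.foldl _ (aStep prefix_ newEvent none ((s : Int), it)) _ = _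
        simp only [aStep]
        rw [if_pos h, foldl_aStep_some, PySem.List.map_snd_enumerate]; rfl
      · rw [if_neg h]
        show List.foldl _ (aStep prefix_ newEvent none ((s : Int), it)) _ = _
        simp only [aStep]
        rw [if_neg h]

-- the core invariant: both loops over the suffix starting at s agree,
-- because B's slice sequence[s+1:] is exactly the remaining itemsets A appends
theorem loops_agree (sequence : List (List Int)) (prefix_ : List Int) (newEvent : Bool) :
    ∀ (xs : List (List Int)) (s : Nat), xs = sequence.drop s →
    altLoop sequence prefix_ newEvent (PySem.List.enumerate xs (s : Int)) =
      (PySem.List.enumerate xs (s : Int)).foldl (aStep prefix_ newEvent) none := by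
  intro xs
  induction xs with
  | nil => intro s _; simp [PySem.List.enumerate_nil, altLoop]
  | cons it rest ih =>
      intro s hdrop
      rw [foldl_aStep_none]
      simp only [PySem.List.enumerate_cons, altLoop]
      by_cases h : (((!newEvent) || decide ((s : Int) > 0)) && prefix_.all (fun x => decide (x ∈ it))) = true
      · simp only [h, if_pos]
        have hslice : PySem.List.slice sequence (some ((s : Int) + 1)) none = sequence.drop (s + 1) := by
          have : ((s : Int) + 1) = ((s + 1 : Nat) : Int) := by push_cast; ring
          rw [this, PySem.List.slice_from_natCast]
        have hrest : rest = sequence.drop (s + 1) := by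
          have := congrArg List.tail hdrop
          simpa [List.tail_drop] using this
        rw [hslice, ← hrest]
      · simp only [h, if_neg, Bool.false_eq_true, not_false_iff]
        have : ((s : Int) + 1) = ((s + 1 : Nat) : Int) := by push_cast; ring
        rw [this]
        apply ih
        have := congrArg List.tail hdrop
        simpa [List.tail_drop] using this

-- ===== VERDICT (by name: the statement is the Claim_ definition above) =====
theorem projectSequence_spec : Claim_equal_projectSequence := by
  intro sequence prefix_ newEvent _
  unfold Spec_projectSequence projectSequence projectSequence_alt
  have h := loops_agree sequence prefix_ newEvent sequence 0 (by simp)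
  simpa using h.symm
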